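-- pv_equiv track=rewrite | github.com/krolikowski80/studia_WSB | Python/zadania/153790_lab2.py | zmien_litery
-- ===== SOURCE A (Python) =====
-- def zmien_litery(tekst):
--     """Modyfikacja wpisanego tekstu"""
--     slowa = tekst.split()
--     for i in range(len(slowa)):
--         if i % 2 == 1:
--             slowa[i] = slowa[i].replace('a', 'A')
--         else:
--             slowa[i] = slowa[i].capitalize()
--     nowy_tekst = ' '.join(slowa)
--     return nowy_tekst
-- ===== SOURCE B (Python) =====
-- def zmien_litery(tekst):
--     """Modyfikacja wpisanego tekstu"""
--     slowa = tekst.split()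
--     slowa[0::2] = [w.capitalize() for w in slowa[0::2]]
--     slowa[1::2] = [w.replace('a', 'A') for w in slowa[1::2]]
--     return ' '.join(slowa)
-- ===== Notes on version B (the rewrite author's own statement) =====
-- stated objective: alternative
-- what changed: Replaces the single indexed loop with its per-index parity branch by two strided passes: one pass capitalizes the even-position words, another applies the letter substitution to the odd-position words, and the strides are interleaved back before rejoining.
import Mathlib
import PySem

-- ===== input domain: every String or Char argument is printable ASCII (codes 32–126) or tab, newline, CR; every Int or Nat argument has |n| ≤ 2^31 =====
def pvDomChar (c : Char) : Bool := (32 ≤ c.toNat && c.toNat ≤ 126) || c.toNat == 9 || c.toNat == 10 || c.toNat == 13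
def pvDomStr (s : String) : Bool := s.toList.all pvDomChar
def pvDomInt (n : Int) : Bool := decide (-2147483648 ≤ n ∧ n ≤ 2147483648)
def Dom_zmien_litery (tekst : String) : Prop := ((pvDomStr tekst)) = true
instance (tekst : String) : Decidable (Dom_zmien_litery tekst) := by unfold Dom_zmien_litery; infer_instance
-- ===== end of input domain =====

-- B replaces A's single indexed loop with its parity branch by two strided passes
-- (even positions capitalized, odd positions 'a'→'A') that are interleaved back; alternative decomposition, same cost.

-- str.capitalize(): first char uppercased, the rest lowercased (exact on the ASCII domain, no PySem primitive)
def pyCapitalize (s : String) : String :=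
  match s.toList with
  | [] => ""
  | c :: rest => String.ofList (PySem.Chars.upperChar c :: rest.map PySem.Chars.lowerChar)

-- ===== PORT A =====
-- the for-loop over range(len(slowa)) rewrites slot i from slot i only: ported as the index-aware map
def zmien_litery (tekst : String) : String :=
  let slowa := PySem.Str.split₀ tekst
  let slowa := slowa.mapIdx (fun i w =>
    if i % 2 == 1 then PySem.Str.replace w "a" "A" else pyCapitalize w)
  PySem.Str.join " " slowa

-- ===== PORT B =====
-- every second element starting at the head (= xs[0::2])
def every2 {α : Type} : List α → List α
  | [] => []
  | [a] => [a]
  | a :: _ :: rest => a :: every2 rest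

-- riffle the two strides back together (slice assignment then reading the list in order)
def interleave {α : Type} : List α → List α → List α
  | [], ys => ys
  | x :: xs, ys => x :: interleave ys xs
termination_by xs ys => xs.length + ys.length
decreasing_by simp; omega

def zmien_litery_alt (tekst : String) : String :=
  let slowa := PySem.Str.split₀ tekst
  let parzyste := (every2 slowa).map pyCapitalize
  let nieparzyste := (every2 (slowa.drop 1)).map (fun w => PySem.Str.replace w "a" "A")
  PySem.Str.join " " (interleave parzyste nieparzyste)

-- ===== PRECONDITION & SPEC =====
def Spec_zmien_litery (tekst : String) (out : String) : Prop := out = zmien_litery_alt tekst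
instance (tekst : String) (out : String) : Decidable (Spec_zmien_litery tekst out) := by unfold Spec_zmien_litery; infer_instance

-- ===== CLAIM (what is proved, stated in full; the proofs are below) =====
def Claim_equal_zmien_litery : Prop := ∀ (tekst : String), Dom_zmien_litery tekst → Spec_zmien_litery tekst (zmien_litery tekst)

-- ===== LEMMAS AND PROOFS =====

theorem every2_cons_drop {α : Type} (b : α) (rest : List α) :
    every2 (b :: rest) = b :: every2 (rest.drop 1) := by
  cases rest <;> simp [every2]

theorem mapIdx_eq_interleave {α β : Type} (f g : α → β) :
    ∀ (l : List α),
      l.mapIdx (fun i w => if i % 2 == 1 then g w else f w)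
        = interleave ((every2 l).map f) ((every2 (l.drop 1)).map g)
  | [] => by simp [every2, interleave]
  | [a] => by simp [every2, interleave]
  | a :: b :: rest => by
    have ih := mapIdx_eq_interleave f g rest
    simp only [List.mapIdx_cons, every2, every2_cons_drop, List.map_cons, List.drop_succ_cons,
      List.drop_zero, interleave, List.cons.injEq]
    refine ⟨by simp, by simp, ?_⟩
    rw [← ih]
    -- reindexing: (i + 1 + 1) % 2 = i % 2
    congr 1
    funext i w
    rw [show (i + 1 + 1) % 2 = i % 2 by omega]

-- ===== VERDICT (by name: the statement is the Claim_ definition above) =====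
theorem zmien_litery_spec : Claim_equal_zmien_litery := by
  intro tekst _
  unfold Spec_zmien_litery zmien_litery zmien_litery_alt
  simp only []
  rw [mapIdx_eq_interleave]
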